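-- pv_equiv track=rewrite | github.com/jslay88/streamcontroller_helldivers_2 | update/locales.py | split_into_labels
-- ===== SOURCE A (Python) =====
-- def split_into_labels(name: str, max_label_length: int = 12) -> dict[str, str]:
--     """
--     Split a stratagem name into top, center, and bottom labels.
--
--     Strategy:
--     - Single word: bottom only
--     - Two words: center + bottom
--     - Three+ words: top + center + bottom
--
--     Args:
--         name: The full display name of the stratagem
--         max_label_length: Maximum characters per label
--
--     Returns:
--         Dict with 'top', 'center', 'bottom' keys
--     """
--     # Handle quoted names (like "Guard Dog")
--     # Keep quotes together with the following word
--     words = name.split()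
--
--     # Merge quoted words
--     merged_words = []
--     i = 0
--     while i < len(words):
--         word = words[i]
--         if word.startswith('"') and not word.endswith('"'):
--             # Find the closing quote
--             quoted = [word]
--             i += 1
--             while i < len(words) and not words[i].endswith('"'):
--                 quoted.append(words[i])
--                 i += 1
--             if i < len(words):
--                 quoted.append(words[i])
--             merged_words.append(' '.join(quoted))
--         else:
--             merged_words.append(word)
--         i += 1
--
--     words = merged_words
--
--     if len(words) == 1:
--         # Single word: just bottom
--         return {"top": "", "center": "", "bottom": words[0]}
--
--     elif len(words) == 2:
--         # Two words: center + bottom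
--         return {"top": "", "center": words[0], "bottom": words[1]}
--
--     elif len(words) == 3:
--         # Three words: top + center + bottom
--         return {"top": words[0], "center": words[1], "bottom": words[2]}
--
--     else:
--         # 4+ words: need to combine some
--         # Try: first word | middle words | last word
--         # Or: first two | middle | last
--
--         # Common patterns:
--         # "Orbital 120MM HE Barrage" -> "Orbital" | "120MM" | "HE Barrage"
--         # "Eagle Napalm Airstrike" -> "Eagle" | "Napalm" | "Airstrike"
--
--         top = words[0]
--         bottom = words[-1]
--         center = ' '.join(words[1:-1])
--
--         # If center is too long, try alternative splits
--         if len(center) > max_label_length: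
--             # Try: first word | second word | rest
--             center = words[1]
--             bottom = ' '.join(words[2:])
--
--             if len(bottom) > max_label_length:
--                 # Last resort: abbreviate or truncate
--                 bottom = bottom[:max_label_length]
--
--         return {"top": top, "center": center, "bottom": bottom}
-- ===== SOURCE B (Python) =====
-- def split_into_labels(name: str, max_label_length: int = 12) -> dict[str, str]:
--     # Single-pass quote merger: a buffer holds the current open quoted group.
--     merged = []
--     buf = None
--     for word in name.split():
--         if buf is not None:
--             buf.append(word)
--             if word.endswith('"'):
--                 merged.append(' '.join(buf))
--                 buf = None
--         elif word.startswith('"') and not word.endswith('"'):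
--             buf = [word]
--         else:
--             merged.append(word)
--     if buf is not None:
--         merged.append(' '.join(buf))
--     n = len(merged)
--     if n <= 3:
--         top, center, bottom = [""] * (3 - n) + merged
--         return {"top": top, "center": center, "bottom": bottom}
--     top = merged[0]
--     bottom = merged[-1]
--     center = ' '.join(merged[1:-1])
--     if len(center) > max_label_length:
--         center = merged[1]
--         bottom = ' '.join(merged[2:])
--         if len(bottom) > max_label_length:
--             bottom = bottom[:max_label_length]
--     return {"top": top, "center": center, "bottom": bottom}
-- ===== Notes on version B (the rewrite author's own statement) =====
-- stated objective: alternative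
-- what changed: The index-jumping outer/inner while quote merger is replaced by a single for-loop fold with an in_quote buffer that is flushed on the closing quote (or at the end), and the 1/2/3-word branches collapse into one left-padding step.
import Mathlib
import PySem

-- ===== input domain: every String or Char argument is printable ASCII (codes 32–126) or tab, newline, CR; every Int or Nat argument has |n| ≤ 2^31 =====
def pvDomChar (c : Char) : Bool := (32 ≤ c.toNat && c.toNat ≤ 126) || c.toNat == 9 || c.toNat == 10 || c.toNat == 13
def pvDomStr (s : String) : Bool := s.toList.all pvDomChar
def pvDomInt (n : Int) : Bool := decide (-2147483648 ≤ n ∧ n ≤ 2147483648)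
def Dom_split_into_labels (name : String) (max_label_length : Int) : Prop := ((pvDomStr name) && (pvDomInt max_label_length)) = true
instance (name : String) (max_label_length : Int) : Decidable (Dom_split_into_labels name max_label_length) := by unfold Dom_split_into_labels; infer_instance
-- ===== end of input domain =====

-- B replaces A's index-jumping nested-while quote merger by a single-pass fold with an
-- open-group buffer and folds the 1/2/3-word branches into one padding step (objective:
-- alternative decomposition; same asymptotic cost).


-- ===== PORT A =====

-- inner while of A: gather words not ending in '"'; then take the closing word if any
def pvInnerA : List String → List String × List String
  | [] => ([], [])
  | x :: xs =>
    if !(PySem.Str.endswith x "\"") then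
      let p := pvInnerA xs
      (x :: p.1, p.2)
    else ([x], xs)

theorem pvInnerA_len_le : ∀ (l : List String), (pvInnerA l).2.length ≤ l.length
  | [] => Nat.le_refl _
  | x :: xs => by
    simp only [pvInnerA]
    split
    · exact Nat.le_succ_of_le (pvInnerA_len_le xs)
    · exact Nat.le_succ _

-- outer while of A over the remaining suffix of words
def pvMergeA : List String → List String
  | [] => []
  | w :: rest =>
    if PySem.Str.startswith w "\"" && !(PySem.Str.endswith w "\"") then
      let p := pvInnerA rest
      PySem.Str.join " " (w :: p.1) :: pvMergeA p.2
    else w :: pvMergeA rest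
termination_by l => l.length
decreasing_by
  · exact Nat.lt_succ_of_le (pvInnerA_len_le rest)
  · simp

def split_into_labels (name : String) (max_label_length : Int) : List (String × String) :=
  let words := PySem.Str.split₀ name
  let merged := pvMergeA words
  if merged.length == 1 then
    [("top", ""), ("center", ""), ("bottom", PySem.List.pyGetD merged 0 "")]
  else if merged.length == 2 then
    [("top", ""), ("center", PySem.List.pyGetD merged 0 ""), ("bottom", PySem.List.pyGetD merged 1 "")]
  else if merged.length == 3 then
    [("top", PySem.List.pyGetD merged 0 ""), ("center", PySem.List.pyGetD merged 1 ""),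
     ("bottom", PySem.List.pyGetD merged 2 "")]
  else
    -- merged[0] raises IndexError when merged = [] (whitespace-only name): excluded by Pre_
    let top := PySem.List.pyGetD merged 0 ""
    let bottom := PySem.List.pyGetD merged (-1) ""
    let center := PySem.Str.join " " (PySem.List.slice merged (some 1) (some (-1)))
    if (PySem.Str.len center : Int) > max_label_length then
      let center := PySem.List.pyGetD merged 1 ""
      let bottom := PySem.Str.join " " (PySem.List.slice merged (some 2) none)
      if (PySem.Str.len bottom : Int) > max_label_length then
        [("top", top), ("center", center), ("bottom", PySem.Str.slice bottom none (some max_label_length))]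
      else [("top", top), ("center", center), ("bottom", bottom)]
    else [("top", top), ("center", center), ("bottom", bottom)]

-- ===== PORT B =====

-- one step of B's for-loop: state = (merged so far, optional open quoted-group buffer)
def pvStepB (st : List String × Option (List String)) (w : String) : List String × Option (List String) :=
  match st.2 with
  | some b =>
    if PySem.Str.endswith w "\"" then (st.1 ++ [PySem.Str.join " " (b ++ [w])], none)
    else (st.1, some (b ++ [w]))
  | none =>
    if PySem.Str.startswith w "\"" && !(PySem.Str.endswith w "\"") then (st.1, some [w])
    else (st.1 ++ [w], none)

-- final flush of a leftover buffer
def pvFlushB (st : List String × Option (List String)) : List String :=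
  match st.2 with
  | some b => st.1 ++ [PySem.Str.join " " b]
  | none => st.1

def pvMergeB (words : List String) : List String :=
  pvFlushB (words.foldl pvStepB ([], none))

def split_into_labels_alt (name : String) (max_label_length : Int) : List (String × String) :=
  let merged := pvMergeB (PySem.Str.split₀ name)
  let n := merged.length
  if n ≤ 3 then
    let padded := List.replicate (3 - n) "" ++ merged
    [("top", PySem.List.pyGetD padded 0 ""), ("center", PySem.List.pyGetD padded 1 ""),
     ("bottom", PySem.List.pyGetD padded 2 "")]
  else
    let top := PySem.List.pyGetD merged 0 ""
    let bottom := PySem.List.pyGetD merged (-1) ""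
    let center := PySem.Str.join " " (PySem.List.slice merged (some 1) (some (-1)))
    if (PySem.Str.len center : Int) > max_label_length then
      let center := PySem.List.pyGetD merged 1 ""
      let bottom := PySem.Str.join " " (PySem.List.slice merged (some 2) none)
      if (PySem.Str.len bottom : Int) > max_label_length then
        [("top", top), ("center", center), ("bottom", PySem.Str.slice bottom none (some max_label_length))]
      else [("top", top), ("center", center), ("bottom", bottom)]
    else [("top", top), ("center", center), ("bottom", bottom)]

-- ===== PRECONDITION & SPEC =====
-- Pre_ excludes whitespace-only names, on which A raises IndexError (words == []).
def Pre_split_into_labels (name : String) (max_label_length : Int) : Prop :=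
  PySem.Str.split₀ name ≠ []
instance (name : String) (max_label_length : Int) : Decidable (Pre_split_into_labels name max_label_length) := by
  unfold Pre_split_into_labels; infer_instance

def pvWitness_split_into_labels : String × Int := ("Orbital 120MM HE Barrage", 12)

def Spec_split_into_labels (name : String) (max_label_length : Int) (out : List (String × String)) : Prop := out = split_into_labels_alt name max_label_length
instance (name : String) (max_label_length : Int) (out : List (String × String)) : Decidable (Spec_split_into_labels name max_label_length out) := by unfold Spec_split_into_labels; infer_instance

-- ===== CLAIM (what is proved, stated in full; the proofs are below) =====
def Claim_equal_split_into_labels : Prop := ∀ (name : String) (max_label_length : Int), Dom_split_into_labels name max_label_length → Pre_split_into_labels name max_label_length → Spec_split_into_labels name max_label_length (split_into_labels name max_label_length)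

-- ===== LEMMAS AND PROOFS =====

-- B's fold, flushed, computes A's merger: joint invariant for closed (none) and open (some b) states.
theorem pvMergeB_invariant : ∀ (ws : List String),
    (∀ m, pvFlushB (ws.foldl pvStepB (m, none)) = m ++ pvMergeA ws) ∧
    (∀ m b, pvFlushB (ws.foldl pvStepB (m, some b)) =
      m ++ (PySem.Str.join " " (b ++ (pvInnerA ws).1) :: pvMergeA (pvInnerA ws).2)) := by
  intro ws
  induction ws with
  | nil => simp [pvFlushB, pvMergeA, pvInnerA]
  | cons w rest ih =>
    constructor
    · intro m
      rw [List.foldl_cons, pvMergeA]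
      simp only [pvStepB]
      by_cases h : (PySem.Str.startswith w "\"" && !(PySem.Str.endswith w "\"")) = true
      · rw [if_pos h, if_pos h, ih.2 m [w]]
        simp
      · rw [if_neg h, if_neg h, ih.1 (m ++ [w])]
        simp
    · intro m b
      rw [List.foldl_cons]
      simp only [pvStepB]
      by_cases h : PySem.Str.endswith w "\"" = true
      · have h' : PySem.Chars.endswith w.toList ['\"'] = true := by simpa using h
        rw [if_pos h, ih.1 (m ++ [PySem.Str.join " " (b ++ [w])])]
        simp only [pvInnerA]
        rw [if_neg (by simp [h'])]
        simp
      · have h' : PySem.Chars.endswith w.toList ['\"'] = false := by simpa using h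
        rw [if_neg h, ih.2 m (b ++ [w])]
        simp only [pvInnerA]
        rw [if_pos (by simp [h'])]
        simp

theorem pvMergeB_eq_pvMergeA (ws : List String) : pvMergeB ws = pvMergeA ws := by
  simpa [pvMergeB] using (pvMergeB_invariant ws).1 []

theorem pvMergeA_ne_nil (w : String) (rest : List String) : pvMergeA (w :: rest) ≠ [] := by
  rw [pvMergeA]; split <;> simp

-- ===== VERDICT (by name: the statement is the Claim_ definition above) =====
theorem split_into_labels_spec : Claim_equal_split_into_labels := by
  intro name max_label_length _ hpre
  unfold Spec_split_into_labels split_into_labels split_into_labels_alt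
  rw [pvMergeB_eq_pvMergeA]
  rcases hw : PySem.Str.split₀ name with _ | ⟨w, ws⟩
  · exact absurd hw hpre
  have hne := pvMergeA_ne_nil w ws
  rcases hm : pvMergeA (w :: ws) with _ | ⟨a, _ | ⟨b, _ | ⟨c, _ | ⟨d, l⟩⟩⟩⟩
  · exact absurd hm hne
  · simp [hm, PySem.List.pyGetD, PySem.List.pyGet?, PySem.List.pyIdx?, List.replicate]
  · simp [hm, PySem.List.pyGetD, PySem.List.pyGet?, PySem.List.pyIdx?, List.replicate]
  · simp [hm, PySem.List.pyGetD, PySem.List.pyGet?, PySem.List.pyIdx?, List.replicate]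
  · simp only [hm, List.length_cons]
    split_ifs <;> (try rfl) <;> (simp only [beq_iff_eq] at * <;> omega)
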